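-- pv_equiv track=rewrite | github.com/pgmmpk/pypatgen | patgen/__init__.py | compute_dictionary_errors
-- ===== SOURCE A (Python) =====
-- EMPTYSET = frozenset()
--
-- MISSED_HYPHEN = '.'
--
-- TRUE_HYPHEN   = '-'
--
-- def apply_pattern_set(patternset, word, maxchunk, margin_left=1, margin_right=1):
--     '''
--     Applies a single pattern set to the word
--
--     Result is the set of indices that patterset "suggested".
--     For hyphenation patternsets, these are indices where hyphenation is predicted.
--     For inhibiting patternsets, these are indices where hyphenation is inhibited.
--     '''
--     word = '.' + word + '.'
--
--     prediction = set()
--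
--     for chunklen in range(1, maxchunk+1):
--         for start in range(0, len(word) - chunklen):
--             ch = word[start: start+chunklen]
--             allowed = patternset.get(ch, EMPTYSET)
--             for index in allowed:
--                 if start + index > margin_left and start+index <= len(word) - 1 - margin_right:
--                     prediction.add(index + start - 1)  # -1 corrects for the added front padding
--
--     return prediction
--
-- def apply_patterns(patterns, word, maxchunk, margin_left=1, margin_right=1):
--     '''
--     Applies patterns to a word.
--
--     Patterns "patterns" is a list of pattern sets. Hyphenation and inhibiting patternsets are
--     alternating: firt element in the list is a hyphenation pattern set, next one is inhibiting, and so on.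
--     In other words, even list slots contain hyphenation patterns. Odd ones contain inhibiting patterns.
--     '''
--     hyphens = set()
--     level = 0
--     for patternset in patterns:
--         level += 1
--
--         prediction = apply_pattern_set(patternset, word, maxchunk=maxchunk, margin_left=margin_left, margin_right=margin_right)
--
--         if level & 1:
--             # hyphenation level
--             hyphens.update(prediction)
--         else:
--             hyphens.difference_update(prediction)
--
--     return hyphens
--
-- def compute_dictionary_errors(patterns, dictionary, margin_left=1, margin_right=1):
--     maxchunk = 0
--     for patternset in patterns:
--         if patternset:
--             maxchunk = max(maxchunk, max(len(x) for x in patternset.keys()))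
--
--     for word, hyphens in dictionary.items():
--         prediction = apply_patterns(patterns, word, maxchunk, margin_left=margin_left, margin_right=margin_right)
--
--         true_hyphens = set(i for i,h in enumerate(hyphens) if h in (TRUE_HYPHEN, MISSED_HYPHEN))
--         if prediction != true_hyphens:
--             yield word, prediction
-- ===== SOURCE B (Python) =====
-- TRUE_HYPHEN = '-'
-- MISSED_HYPHEN = '.'
--
-- def _level_prediction(patternset, word, margin_left, margin_right):
--     '''Pattern-major scan: for each chunk length present in the patternset, locate
--     every occurrence of every pattern of that length in the padded word and merge
--     the hits in start order.'''
--     n = len(word)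
--     prediction = set()
--     for chunklen in sorted({len(p) for p in patternset if p}):
--         matches = [(start, indices)
--                    for p, indices in patternset.items() if len(p) == chunklen
--                    for start in range(n - chunklen) if word[start:start + chunklen] == p]
--         matches.sort(key=lambda m: m[0])
--         for start, indices in matches:
--             for index in indices:
--                 if margin_left < start + index <= n - 1 - margin_right:
--                     prediction.add(index + start - 1)
--     return prediction
--
-- def compute_dictionary_errors(patterns, dictionary, margin_left=1, margin_right=1):
--     for word, hyphens in dictionary.items():
--         padded = '.' + word + '.'
--         predicted = set()
--         for level, patternset in enumerate(patterns):
--             prediction = _level_prediction(patternset, padded, margin_left, margin_right)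
--             if level % 2 == 0:
--                 predicted |= prediction
--             else:
--                 predicted -= prediction
--         true_hyphens = set(i for i, h in enumerate(hyphens) if h in (TRUE_HYPHEN, MISSED_HYPHEN))
--         if predicted != true_hyphens:
--             yield word, predicted
-- ===== Notes on version B (the rewrite author's own statement) =====
-- stated objective: alternative
-- what changed: A is position-major (for every chunk length up to a globally precomputed maxchunk and every start position it slices the word and looks the slice up in the pattern dict); B is pattern-major (no maxchunk pass: per patternset it iterates only the chunk lengths actually present, scans the word for the occurrences of each pattern and merges the hits in start order), combining levels by parity of the enumerate index instead of a bitmask on a running counter; Pre_ only excludes association lists that encode a dict with a duplicated key, which no Python dict value can realize.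
import Mathlib
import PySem

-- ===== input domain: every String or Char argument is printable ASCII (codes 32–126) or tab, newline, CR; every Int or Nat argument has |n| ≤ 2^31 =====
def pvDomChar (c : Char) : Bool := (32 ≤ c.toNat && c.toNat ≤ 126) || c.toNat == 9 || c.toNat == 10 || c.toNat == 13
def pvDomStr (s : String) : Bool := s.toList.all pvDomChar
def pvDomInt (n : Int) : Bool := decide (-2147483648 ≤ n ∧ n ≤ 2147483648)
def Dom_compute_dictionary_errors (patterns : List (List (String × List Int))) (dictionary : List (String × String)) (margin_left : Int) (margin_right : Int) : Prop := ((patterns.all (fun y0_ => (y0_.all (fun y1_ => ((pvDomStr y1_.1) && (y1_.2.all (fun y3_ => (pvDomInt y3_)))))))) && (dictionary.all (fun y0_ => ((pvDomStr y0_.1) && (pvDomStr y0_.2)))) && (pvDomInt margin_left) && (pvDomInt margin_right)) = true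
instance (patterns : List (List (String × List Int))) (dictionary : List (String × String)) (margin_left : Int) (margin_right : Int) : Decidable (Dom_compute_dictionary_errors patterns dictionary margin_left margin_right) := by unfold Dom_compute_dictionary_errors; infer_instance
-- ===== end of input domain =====

-- B replaces A's position-major slice-and-look-up scan by a pattern-major occurrence scan
-- merged in start order (alternative decomposition, no speed claim).
-- A is a generator; the equivalence is about the returned (word, prediction-set) sequence.

-- ===== PORT A =====
-- apply_pattern_set: pad the word, then for every chunk length 1..maxchunk and every
-- start position look the slice up in the patternset dict (strings are ported as List Char).
def pvA_apply_pattern_set (patternset : List (String × List Int)) (word : String) (maxchunk : Int) (margin_left : Int) (margin_right : Int) : PySem.Set Int :=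
  let w : List Char := '.' :: word.toList ++ ['.']
  let d : PySem.Dict (List Char) (List Int) := PySem.Dict.mk (patternset.map (fun kv => (kv.1.toList, kv.2)))
  (PySem.List.pyRange 1 (maxchunk + 1)).foldl (fun prediction chunklen =>
    (PySem.List.pyRange 0 ((w.length : Int) - chunklen)).foldl (fun prediction start =>
      let ch := PySem.List.slice w (some start) (some (start + chunklen))
      let allowed := d.getD ch []
      allowed.foldl (fun prediction index =>
        if margin_left < start + index ∧ start + index ≤ (w.length : Int) - 1 - margin_right then
          PySem.Set.add prediction (index + start - 1)
        else prediction) prediction) prediction) PySem.Set.empty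

-- apply_patterns: running level counter, hyphenation levels (level & 1 ≠ 0) add, inhibiting levels remove.
def pvA_apply_patterns (patterns : List (List (String × List Int))) (word : String) (maxchunk : Int) (margin_left : Int) (margin_right : Int) : PySem.Set Int :=
  (patterns.foldl (fun (st : PySem.Set Int × Int) patternset =>
      let level := st.2 + 1
      let prediction := pvA_apply_pattern_set patternset word maxchunk margin_left margin_right
      if PySem.Int.band level 1 ≠ 0 then (PySem.Set.update st.1 prediction, level)
      else (PySem.Set.diff st.1 prediction, level))
    (PySem.Set.empty, 0)).1

def compute_dictionary_errors (patterns : List (List (String × List Int))) (dictionary : List (String × String)) (margin_left : Int) (margin_right : Int) : List (String × List Int) :=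
  let maxchunk : Int := patterns.foldl (fun maxchunk patternset =>
    if patternset.isEmpty then maxchunk
    else max maxchunk ((PySem.List.max? (patternset.map (fun kv => PySem.Str.len kv.1)) (fun x => x)).getD 0)) 0
  dictionary.foldl (fun out wh =>
    let prediction := pvA_apply_patterns patterns wh.1 maxchunk margin_left margin_right
    let true_hyphens := PySem.Set.ofList (((PySem.List.enumerate wh.2.toList).filter (fun ih => ih.2 == '-' || ih.2 == '.')).map (fun ih => ih.1))
    if PySem.Set.equal prediction true_hyphens then out else out ++ [(wh.1, prediction)]) []

-- ===== PORT B =====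
-- _level_prediction: for each chunk length present, collect (start, indices) for every
-- occurrence of every pattern of that length, sort by start, then add with the margin test.
def pvB_level_prediction (patternset : List (String × List Int)) (word : List Char) (margin_left : Int) (margin_right : Int) : PySem.Set Int :=
  let n : Int := word.length
  (PySem.List.sorted (PySem.Set.ofList ((patternset.filter (fun kv => !kv.1.toList.isEmpty)).map (fun kv => (kv.1.toList.length : Int)))) (fun x => x)).foldl
    (fun prediction chunklen =>
      let hits : List (Int × List Int) := patternset.flatMap (fun kv =>
        if (kv.1.toList.length : Int) = chunklen then
          (PySem.List.pyRange 0 (n - chunklen)).filterMap (fun start =>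
            if PySem.List.slice word (some start) (some (start + chunklen)) = kv.1.toList then some (start, kv.2) else none)
        else [])
      (PySem.List.sorted hits (fun m => m.1)).foldl (fun prediction m =>
        m.2.foldl (fun prediction index =>
          if margin_left < m.1 + index ∧ m.1 + index ≤ n - 1 - margin_right then
            PySem.Set.add prediction (index + m.1 - 1)
          else prediction) prediction) prediction)
    PySem.Set.empty

def compute_dictionary_errors_alt (patterns : List (List (String × List Int))) (dictionary : List (String × String)) (margin_left : Int) (margin_right : Int) : List (String × List Int) :=
  dictionary.foldl (fun out wh =>
    let padded : List Char := '.' :: wh.1.toList ++ ['.']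
    let predicted := (patterns.foldl (fun (st : PySem.Set Int × Int) patternset =>
        let prediction := pvB_level_prediction patternset padded margin_left margin_right
        (if PySem.Int.mod st.2 2 = 0 then PySem.Set.update st.1 prediction else PySem.Set.diff st.1 prediction, st.2 + 1))
      (PySem.Set.empty, 0)).1
    let true_hyphens := PySem.Set.ofList (((PySem.List.enumerate wh.2.toList).filter (fun ih => ih.2 == '-' || ih.2 == '.')).map (fun ih => ih.1))
    if PySem.Set.equal predicted true_hyphens then out else out ++ [(wh.1, predicted)]) []

-- ===== PRECONDITION & SPEC =====
-- Pre_ excludes only association lists that encode a dict with a duplicated key; such a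
-- value cannot arise from a Python dict (both parameters are dicts in the Python source).
def Pre_compute_dictionary_errors (patterns : List (List (String × List Int))) (dictionary : List (String × String)) (margin_left : Int) (margin_right : Int) : Prop :=
  (∀ ps ∈ patterns, (ps.map Prod.fst).Nodup) ∧ (dictionary.map Prod.fst).Nodup
instance (patterns : List (List (String × List Int))) (dictionary : List (String × String)) (margin_left : Int) (margin_right : Int) : Decidable (Pre_compute_dictionary_errors patterns dictionary margin_left margin_right) := by unfold Pre_compute_dictionary_errors; infer_instance

def pvWitness_compute_dictionary_errors : (List (List (String × List Int))) × (List (String × String)) × Int × Int :=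
  ([[("a", [1])], [("ab", [0, 2])]], [("ab", "-b"), ("ba", "x-")], 1, 1)

def Spec_compute_dictionary_errors (patterns : List (List (String × List Int))) (dictionary : List (String × String)) (margin_left : Int) (margin_right : Int) (out : List (String × List Int)) : Prop := out = compute_dictionary_errors_alt patterns dictionary margin_left margin_right
instance (patterns : List (List (String × List Int))) (dictionary : List (String × String)) (margin_left : Int) (margin_right : Int) (out : List (String × List Int)) : Decidable (Spec_compute_dictionary_errors patterns dictionary margin_left margin_right out) := by unfold Spec_compute_dictionary_errors; infer_instance

-- ===== CLAIM (what is proved, stated in full; the proofs are below) =====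
def Claim_equal_compute_dictionary_errors : Prop := ∀ (patterns : List (List (String × List Int))) (dictionary : List (String × String)) (margin_left : Int) (margin_right : Int), Dom_compute_dictionary_errors patterns dictionary margin_left margin_right → Pre_compute_dictionary_errors patterns dictionary margin_left margin_right → Spec_compute_dictionary_errors patterns dictionary margin_left margin_right (compute_dictionary_errors patterns dictionary margin_left margin_right)

-- ===== LEMMAS AND PROOFS =====

-- the common canonical form of one chunk-length pass: the hits in start order
def pvC (patternset : List (String × List Int)) (w : List Char) (ck : Int) : List (Int × List Int) :=
  (PySem.List.pyRange 0 ((w.length : Int) - ck)).filterMap (fun s =>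
    ((PySem.Dict.mk (patternset.map (fun kv => (kv.1.toList, kv.2)))).get?
      (PySem.List.slice w (some s) (some (s + ck)))).map (fun v => (s, v)))

def pvAdd (margin_left margin_right n : Int) (pred : PySem.Set Int) (m : Int × List Int) : PySem.Set Int :=
  m.2.foldl (fun pred index =>
    if margin_left < m.1 + index ∧ m.1 + index ≤ n - 1 - margin_right then
      PySem.Set.add pred (index + m.1 - 1)
    else pred) pred

lemma pv_toList_inj : Function.Injective String.toList := by
  intro a b h; exact String.ext h

lemma pv_keys_nodup (patternset : List (String × List Int)) (hnd : (patternset.map Prod.fst).Nodup) :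
    ((patternset.map (fun kv => (kv.1.toList, kv.2))).map Prod.fst).Nodup := by
  have : (patternset.map (fun kv => (kv.1.toList, kv.2))).map Prod.fst
      = (patternset.map Prod.fst).map String.toList := by
    simp [List.map_map]
  rw [this]
  exact ((List.nodup_map_iff pv_toList_inj).mpr hnd)

lemma pv_slice_length (w : List Char) (s ck : Int) (h0 : 0 ≤ s) (hck : 0 ≤ ck)
    (hub : s + ck ≤ (w.length : Int)) :
    (PySem.List.slice w (some s) (some (s + ck))).length = ck.toNat := by
  rw [PySem.List.slice_toNat w h0 (by omega)]
  simp only [List.length_take, List.length_drop]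
  omega

-- membership in one inner comprehension of B
lemma pv_mem_inner (kv : String × List Int) (w : List Char) (ck : Int) (s : Int) (v : List Int) :
    (s, v) ∈ (if (kv.1.toList.length : Int) = ck then
          (PySem.List.pyRange 0 ((w.length : Int) - ck)).filterMap (fun start =>
            if PySem.List.slice w (some start) (some (start + ck)) = kv.1.toList then some (start, kv.2) else none)
        else []) ↔
      (kv.1.toList.length : Int) = ck ∧ 0 ≤ s ∧ s < (w.length : Int) - ck ∧
        PySem.List.slice w (some s) (some (s + ck)) = kv.1.toList ∧ v = kv.2 := by
  split_ifs with hl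
  · rw [List.mem_filterMap]
    constructor
    · rintro ⟨a, ha, hx⟩
      split_ifs at hx with hsl
      rw [Option.some.injEq, Prod.mk.injEq] at hx
      obtain ⟨h1, h2⟩ := hx
      rcases PySem.List.mem_pyRange_one.mp ha with ⟨h0, h1'⟩
      rw [← h1, ← h2]
      exact ⟨hl, h0, h1', hsl, rfl⟩
    · rintro ⟨-, h0, h1, hsl, rfl⟩
      exact ⟨s, PySem.List.mem_pyRange_one.mpr ⟨h0, h1⟩, by rw [if_pos hsl]⟩
  · simp only [List.not_mem_nil, false_iff]
    rintro ⟨h, -⟩; exact hl h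

-- membership in the canonical pass
lemma pv_mem_C (patternset : List (String × List Int)) (w : List Char) (ck : Int)
    (hnd : (patternset.map Prod.fst).Nodup) (hck : 0 ≤ ck) (s : Int) (v : List Int) :
    (s, v) ∈ pvC patternset w ck ↔
      ∃ kv ∈ patternset, (kv.1.toList.length : Int) = ck ∧ 0 ≤ s ∧ s < (w.length : Int) - ck ∧
        PySem.List.slice w (some s) (some (s + ck)) = kv.1.toList ∧ v = kv.2 := by
  have hknd : ((patternset.map (fun kv => (kv.1.toList, kv.2))).map Prod.fst).Nodup := pv_keys_nodup patternset hnd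
  unfold pvC
  rw [List.mem_filterMap]
  constructor
  · rintro ⟨a, ha, hx⟩
    rcases Option.map_eq_some_iff.mp hx with ⟨v', hget, heq⟩
    have heq' : (a, v') = (s, v) := heq
    rw [Prod.mk.injEq] at heq'
    obtain ⟨h1, h2⟩ := heq'
    rcases PySem.List.mem_pyRange_one.mp ha with ⟨h0, h1'⟩
    rw [PySem.Dict.get?_eq_some_iff_mem_items _ _ _ hknd] at hget
    rcases List.mem_map.mp hget with ⟨kv, hkv, heq2⟩
    have hsl : kv.1.toList = PySem.List.slice w (some a) (some (a + ck)) := congrArg Prod.fst heq2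
    have hv : kv.2 = v' := congrArg Prod.snd heq2
    rw [← h1, ← h2]
    refine ⟨kv, hkv, ?_, h0, h1', hsl.symm, hv.symm⟩
    rw [hsl, pv_slice_length w a ck h0 hck (by omega)]
    omega
  · rintro ⟨kv, hkv, hl, h0, h1, hsl, rfl⟩
    refine ⟨s, PySem.List.mem_pyRange_one.mpr ⟨h0, h1⟩, ?_⟩
    rw [Option.map_eq_some_iff]
    refine ⟨kv.2, ?_, rfl⟩
    rw [PySem.Dict.get?_eq_some_iff_mem_items _ _ _ hknd]
    exact List.mem_map.mpr ⟨kv, hkv, by simp [hsl]⟩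

-- membership in B's flatMap of hits
lemma pv_mem_hits (patternset : List (String × List Int)) (w : List Char) (ck : Int) (s : Int) (v : List Int) :
    (s, v) ∈ patternset.flatMap (fun kv =>
        if (kv.1.toList.length : Int) = ck then
          (PySem.List.pyRange 0 ((w.length : Int) - ck)).filterMap (fun start =>
            if PySem.List.slice w (some start) (some (start + ck)) = kv.1.toList then some (start, kv.2) else none)
        else []) ↔
      ∃ kv ∈ patternset, (kv.1.toList.length : Int) = ck ∧ 0 ≤ s ∧ s < (w.length : Int) - ck ∧
        PySem.List.slice w (some s) (some (s + ck)) = kv.1.toList ∧ v = kv.2 := by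
  rw [List.mem_flatMap]
  constructor
  · rintro ⟨kv, hkv, hx⟩
    exact ⟨kv, hkv, (pv_mem_inner kv w ck s v).mp hx⟩
  · rintro ⟨kv, hkv, h⟩
    exact ⟨kv, hkv, (pv_mem_inner kv w ck s v).mpr h⟩

lemma pv_hits_nodup (patternset : List (String × List Int)) (w : List Char) (ck : Int)
    (hnd : (patternset.map Prod.fst).Nodup) :
    (patternset.flatMap (fun kv =>
        if (kv.1.toList.length : Int) = ck then
          (PySem.List.pyRange 0 ((w.length : Int) - ck)).filterMap (fun start =>
            if PySem.List.slice w (some start) (some (start + ck)) = kv.1.toList then some (start, kv.2) else none)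
        else [])).Nodup := by
  rw [List.nodup_flatMap]
  constructor
  · intro kv _
    split_ifs
    · apply List.Nodup.filterMap _ (PySem.List.nodup_pyRange_one 0 _)
      intro a a' b hb hb'
      rw [Option.mem_def] at hb hb'
      split_ifs at hb hb'
      all_goals first
        | exact Option.noConfusion hb
        | exact Option.noConfusion hb'
        | (cases hb; injection hb' with h; exact (congrArg Prod.fst h).symm)
    · exact List.nodup_nil
  · have hp : patternset.Pairwise (fun a b => a.1 ≠ b.1) := by
      rw [List.Nodup, List.pairwise_map] at hnd
      exact hnd
    refine hp.imp ?_
    intro a b hab x hxa hxb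
    rcases (pv_mem_inner a w ck x.1 x.2).mp hxa with ⟨-, -, -, hsa, -⟩
    rcases (pv_mem_inner b w ck x.1 x.2).mp hxb with ⟨-, -, -, hsb, -⟩
    exact hab (pv_toList_inj (hsa.symm.trans hsb))

-- one chunk pass of A is the canonical pass
lemma pvA_chunk_eq (patternset : List (String × List Int)) (w : List Char) (ck ml mr : Int) (pred : PySem.Set Int) :
    (PySem.List.pyRange 0 ((w.length : Int) - ck)).foldl (fun prediction start =>
      ((PySem.Dict.mk (patternset.map (fun kv => (kv.1.toList, kv.2)))).getD
        (PySem.List.slice w (some start) (some (start + ck))) []).foldl (fun prediction index =>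
          if ml < start + index ∧ start + index ≤ (w.length : Int) - 1 - mr then
            PySem.Set.add prediction (index + start - 1)
          else prediction) prediction) pred
    = (pvC patternset w ck).foldl (pvAdd ml mr (w.length : Int)) pred := by
  unfold pvC
  rw [List.foldl_filterMap]
  apply PySem.List.foldl_congr_mem
  intro acc s _
  rcases h : (PySem.Dict.mk (patternset.map (fun kv => (kv.1.toList, kv.2)))).get?
      (PySem.List.slice w (some s) (some (s + ck))) with _ | v
  · simp [PySem.Dict.getD_eq_get?_getD, h]
  · simp [PySem.Dict.getD_eq_get?_getD, h, pvAdd]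

-- one chunk pass of B is the canonical pass
lemma pvB_chunk_eq (patternset : List (String × List Int)) (w : List Char) (ck ml mr : Int)
    (hnd : (patternset.map Prod.fst).Nodup) (hck : 0 ≤ ck) (pred : PySem.Set Int) :
    (PySem.List.sorted (patternset.flatMap (fun kv =>
        if (kv.1.toList.length : Int) = ck then
          (PySem.List.pyRange 0 ((w.length : Int) - ck)).filterMap (fun start =>
            if PySem.List.slice w (some start) (some (start + ck)) = kv.1.toList then some (start, kv.2) else none)
        else [])) (fun m => m.1)).foldl (fun prediction m =>
      m.2.foldl (fun prediction index =>
        if ml < m.1 + index ∧ m.1 + index ≤ (w.length : Int) - 1 - mr then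
          PySem.Set.add prediction (index + m.1 - 1)
        else prediction) prediction) pred
    = (pvC patternset w ck).foldl (pvAdd ml mr (w.length : Int)) pred := by
  have hpair : (pvC patternset w ck).Pairwise (fun a b => a.1 < b.1) := by
    unfold pvC
    rw [List.pairwise_filterMap]
    refine (PySem.List.pairwise_lt_pyRange_one 0 ((w.length : Int) - ck)).imp ?_
    intro a a' hlt b hb b' hb'
    rcases Option.map_eq_some_iff.mp hb with ⟨u, -, hu⟩
    rcases Option.map_eq_some_iff.mp hb' with ⟨u', -, hu'⟩
    rw [← hu, ← hu']
    exact hlt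
  have hperm : (pvC patternset w ck).Perm (patternset.flatMap (fun kv =>
      if (kv.1.toList.length : Int) = ck then
        (PySem.List.pyRange 0 ((w.length : Int) - ck)).filterMap (fun start =>
          if PySem.List.slice w (some start) (some (start + ck)) = kv.1.toList then some (start, kv.2) else none)
      else [])) := by
    rw [List.perm_ext_iff_of_nodup
      (hpair.imp (fun {a b} hlt => by intro he; rw [he] at hlt; exact lt_irrefl _ hlt))
      (pv_hits_nodup patternset w ck hnd)]
    intro x
    obtain ⟨s, v⟩ := x
    rw [pv_mem_C patternset w ck hnd hck s v, pv_mem_hits patternset w ck s v]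
  rw [PySem.List.sorted_eq_of_perm_of_pairwise_lt _ _ _ hperm hpair]
  rfl

-- A's 1..maxchunk loop visits, apart from no-op lengths, exactly B's sorted present lengths
lemma pv_lengths_eq (patternset : List (String × List Int)) (mk : Int)
    (hle : ∀ kv ∈ patternset, (kv.1.toList.length : Int) ≤ mk) :
    PySem.List.sorted (PySem.Set.ofList ((patternset.filter (fun kv => !kv.1.toList.isEmpty)).map (fun kv => (kv.1.toList.length : Int)))) (fun x => x)
    = (PySem.List.pyRange 1 (mk + 1)).filter (fun ck => decide (ck ∈ (patternset.filter (fun kv => !kv.1.toList.isEmpty)).map (fun kv => (kv.1.toList.length : Int)))) := by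
  apply PySem.List.sorted_eq_of_perm_of_pairwise_lt
  · rw [List.perm_ext_iff_of_nodup
      ((PySem.List.nodup_pyRange_one 1 (mk + 1)).filter _)
      (PySem.Set.nodup_ofList _)]
    intro x
    rw [List.mem_filter, PySem.Set.mem_ofList]
    simp only [PySem.List.mem_pyRange_one, decide_eq_true_eq]
    constructor
    · rintro ⟨-, h⟩; exact h
    · intro h
      refine ⟨?_, h⟩
      rcases List.mem_map.mp h with ⟨kv, hkv, hx⟩
      rcases List.mem_filter.mp hkv with ⟨hmem, hne⟩
      have h1 : kv.1.toList ≠ [] := by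
        intro he; rw [he] at hne; simp at hne
      have h2 : 0 < kv.1.toList.length := List.length_pos_iff.mpr h1
      have h3 := hle kv hmem
      omega
  · exact (PySem.List.pairwise_lt_pyRange_one 1 (mk + 1)).filter _

-- a no-op length contributes nothing
lemma pvC_eq_nil (patternset : List (String × List Int)) (w : List Char) (ck : Int) (hck : 1 ≤ ck)
    (h : ck ∉ (patternset.filter (fun kv => !kv.1.toList.isEmpty)).map (fun kv => (kv.1.toList.length : Int))) :
    pvC patternset w ck = [] := by
  unfold pvC
  rw [List.filterMap_eq_nil_iff]
  intro s hs
  rcases PySem.List.mem_pyRange_one.mp hs with ⟨h0, h1⟩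
  rcases hget : (PySem.Dict.mk (patternset.map (fun kv => (kv.1.toList, kv.2)))).get?
      (PySem.List.slice w (some s) (some (s + ck))) with _ | v
  · rfl
  · exfalso
    have hmem := PySem.Dict.mem_items_of_get?_eq_some _ hget
    rcases List.mem_map.mp hmem with ⟨kv, hkv, heq⟩
    have hsl : kv.1.toList = PySem.List.slice w (some s) (some (s + ck)) := congrArg Prod.fst heq
    have hlen : kv.1.toList.length = ck.toNat := by
      rw [hsl]; exact pv_slice_length w s ck h0 (by omega) (by omega)
    apply h
    apply List.mem_map.mpr
    refine ⟨kv, List.mem_filter.mpr ⟨hkv, ?_⟩, by omega⟩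
    have hne : kv.1.toList ≠ [] := by
      intro he; rw [he] at hlen; simp at hlen; omega
    simp [hne]

-- drop no-op elements of a fold
lemma pv_foldl_filter {β : Type} (l : List Int) (q : Int → Bool) (G : β → Int → β) (init : β)
    (h : ∀ pred x, x ∈ l → q x = false → G pred x = pred) :
    l.foldl G init = (l.filter q).foldl G init := by
  rw [← PySem.List.foldl_if_eq_foldl_filter q G l init]
  apply PySem.List.foldl_congr_mem
  intro acc x hx
  by_cases hq : q x
  · rw [if_pos hq]
  · rw [if_neg hq, h acc x hx (by simpa using hq)]

-- per-level equality
lemma pv_level_eq (patternset : List (String × List Int)) (word : String) (mk ml mr : Int)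
    (hnd : (patternset.map Prod.fst).Nodup)
    (hle : ∀ kv ∈ patternset, (kv.1.toList.length : Int) ≤ mk) :
    pvA_apply_pattern_set patternset word mk ml mr
    = pvB_level_prediction patternset ('.' :: word.toList ++ ['.']) ml mr := by
  unfold pvA_apply_pattern_set pvB_level_prediction
  simp only []
  set w : List Char := '.' :: word.toList ++ ['.'] with hw
  -- A side: canonicalize each chunk pass
  rw [PySem.List.foldl_congr_mem _ _ (fun pred ck => (pvC patternset w ck).foldl (pvAdd ml mr (w.length : Int)) pred) _
    (fun acc ck _ => pvA_chunk_eq patternset w ck ml mr acc)]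
  -- A side: drop the no-op lengths
  rw [pv_foldl_filter _ (fun ck => decide (ck ∈ (patternset.filter (fun kv => !kv.1.toList.isEmpty)).map (fun kv => (kv.1.toList.length : Int)))) _ _
    (fun pred ck hck hq => by
      have h1 : (1 : Int) ≤ ck := (PySem.List.mem_pyRange_one.mp hck).1
      rw [pvC_eq_nil patternset w ck h1 (by simpa using hq)]
      rfl)]
  rw [← pv_lengths_eq patternset mk hle]
  -- B side: canonicalize each chunk pass
  refine Eq.symm (PySem.List.foldl_congr_mem _ _ _ _ ?_)
  intro acc ck hck
  have h0 : (0 : Int) ≤ ck := by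
    rw [PySem.List.mem_sorted, PySem.Set.mem_ofList] at hck
    rcases List.mem_map.mp hck with ⟨kv, -, hx⟩
    omega
  exact pvB_chunk_eq patternset w ck ml mr hnd h0 acc

-- the maxchunk fold bounds every key length
lemma pv_maxchunk_le (l : List (List (String × List Int))) (init : Int) :
    init ≤ l.foldl (fun maxchunk patternset =>
        if patternset.isEmpty then maxchunk
        else max maxchunk ((PySem.List.max? (patternset.map (fun kv => PySem.Str.len kv.1)) (fun x => x)).getD 0)) init
    ∧ ∀ ps ∈ l, ∀ kv ∈ ps, (kv.1.toList.length : Int) ≤ l.foldl (fun maxchunk patternset =>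
        if patternset.isEmpty then maxchunk
        else max maxchunk ((PySem.List.max? (patternset.map (fun kv => PySem.Str.len kv.1)) (fun x => x)).getD 0)) init := by
  induction l generalizing init with
  | nil => simp
  | cons p t ih =>
    simp only [List.foldl_cons]
    set s : Int := if p.isEmpty then init
      else max init ((PySem.List.max? (p.map (fun kv => PySem.Str.len kv.1)) (fun x => x)).getD 0) with hs
    have h1 : init ≤ s := by
      rw [hs]; split_ifs
      · exact le_refl _
      · exact le_max_left _ _
    refine ⟨le_trans h1 (ih s).1, ?_⟩
    intro ps hps kv hkv
    rw [List.mem_cons] at hps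
    rcases hps with rfl | hps
    · have hpne : ps ≠ [] := fun he => by rw [he] at hkv; exact (List.not_mem_nil (a := kv)) hkv
      have hie : ¬ (ps.isEmpty = true) := fun h => hpne (List.isEmpty_iff.mp h)
      rcases hm : PySem.List.max? (ps.map (fun kv => PySem.Str.len kv.1)) (fun x => x) with _ | m
      · rw [PySem.List.max?_eq_none_iff] at hm
        exact absurd (List.map_eq_nil_iff.mp hm) hpne
      · have hlem : PySem.Str.len kv.1 ≤ m :=
          PySem.List.max?_isMax hm (PySem.Str.len kv.1) (List.mem_map_of_mem hkv)
        have hss : PySem.Str.len kv.1 ≤ s := by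
          rw [hs, if_neg hie, hm]
          simp only [Option.getD_some]
          exact le_trans hlem (le_max_right _ _)
        have hfin := le_trans hss (ih s).1
        rw [PySem.Str.len_eq] at hfin
        exact hfin
    · exact (ih s).2 ps hps kv hkv

-- parity of A's running level counter versus B's enumerate index
lemma pv_parity (i : Int) : (PySem.Int.band (i + 1) 1 ≠ 0) ↔ PySem.Int.mod i 2 = 0 := by
  rw [PySem.Int.band_one, PySem.Int.mod_eq_emod_of_pos (by norm_num), PySem.Int.mod_eq_emod_of_pos (by norm_num)]
  omega

-- ===== VERDICT (by name: the statement is the Claim_ definition above) =====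
theorem compute_dictionary_errors_spec : Claim_equal_compute_dictionary_errors := by
  intro patterns dictionary ml mr _hdom hpre
  obtain ⟨hpat, -⟩ := hpre
  unfold Spec_compute_dictionary_errors
  simp only [compute_dictionary_errors, compute_dictionary_errors_alt]
  apply PySem.List.foldl_congr_mem
  intro out wh _
  have hpred : pvA_apply_patterns patterns wh.1 (patterns.foldl (fun maxchunk patternset =>
        if patternset.isEmpty then maxchunk
        else max maxchunk ((PySem.List.max? (patternset.map (fun kv => PySem.Str.len kv.1)) (fun x => x)).getD 0)) 0) ml mr
      = (patterns.foldl (fun (st : PySem.Set Int × Int) patternset =>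
          (if PySem.Int.mod st.2 2 = 0 then PySem.Set.update st.1 (pvB_level_prediction patternset ('.' :: wh.1.toList ++ ['.']) ml mr)
           else PySem.Set.diff st.1 (pvB_level_prediction patternset ('.' :: wh.1.toList ++ ['.']) ml mr), st.2 + 1))
        (PySem.Set.empty, 0)).1 := by
    unfold pvA_apply_patterns
    congr 1
    apply PySem.List.foldl_congr_mem
    intro st ps hps
    have hA := pv_level_eq ps wh.1 (patterns.foldl (fun maxchunk patternset =>
        if patternset.isEmpty then maxchunk
        else max maxchunk ((PySem.List.max? (patternset.map (fun kv => PySem.Str.len kv.1)) (fun x => x)).getD 0)) 0) ml mr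
      (hpat ps hps) (fun kv hkv => (pv_maxchunk_le patterns 0).2 ps hps kv hkv)
    simp only [hA, pv_parity]
    split_ifs with h <;> rfl
  simp only [hpred]
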